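-- pv_equiv track=rewrite | github.com/WillBarton888/dilithion | demo_wallet_simple.py | validate_passphrase
-- ===== SOURCE A (Python) =====
-- def validate_passphrase(passphrase):
--     if not passphrase:
--         return 0, "No passphrase"
--
--     score = min(len(passphrase) * 5, 50)
--     if any(c.isupper() for c in passphrase): score += 10
--     if any(c.islower() for c in passphrase): score += 10
--     if any(c.isdigit() for c in passphrase): score += 10
--     if any(c in '!@#$%^&*()_+-=[]{}|;:,.<>?' for c in passphrase): score += 20
--
--     if score >= 90: return score, "Very Strong"
--     elif score >= 70: return score, "Strong"
--     elif score >= 50: return score, "Medium"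
--     elif score >= 30: return score, "Weak"
--     else: return score, "Very Weak"
-- ===== SOURCE B (Python) =====
-- def validate_passphrase(passphrase):
--     if not passphrase:
--         return 0, "No passphrase"
--
--     SPECIAL = '!@#$%^&*()_+-=[]{}|;:,.<>?'
--     WEIGHTS = {'U': 10, 'L': 10, 'D': 10, 'S': 20}
--
--     def classify(c):
--         if c.isupper(): return 'U'
--         if c.islower(): return 'L'
--         if c.isdigit(): return 'D'
--         if c in SPECIAL: return 'S'
--         return None
--
--     classes = set(filter(None, map(classify, passphrase)))
--     score = min(len(passphrase) * 5, 50) + sum(WEIGHTS[k] for k in classes)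
--
--     labels = ("Very Weak", "Weak", "Medium", "Strong", "Very Strong")
--     idx = sum(score >= t for t in (30, 50, 70, 90))
--     return score, labels[idx]
-- ===== Notes on version B (the rewrite author's own statement) =====
-- stated objective: alternative
-- what changed: Instead of four independent any() scans plus an if/elif ladder, B maps every character to a class tag, builds the set of tags present, computes the bonus as the sum of a weight table over that set, and selects the label by indexing a label table with the count of thresholds reached.
import Mathlib
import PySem

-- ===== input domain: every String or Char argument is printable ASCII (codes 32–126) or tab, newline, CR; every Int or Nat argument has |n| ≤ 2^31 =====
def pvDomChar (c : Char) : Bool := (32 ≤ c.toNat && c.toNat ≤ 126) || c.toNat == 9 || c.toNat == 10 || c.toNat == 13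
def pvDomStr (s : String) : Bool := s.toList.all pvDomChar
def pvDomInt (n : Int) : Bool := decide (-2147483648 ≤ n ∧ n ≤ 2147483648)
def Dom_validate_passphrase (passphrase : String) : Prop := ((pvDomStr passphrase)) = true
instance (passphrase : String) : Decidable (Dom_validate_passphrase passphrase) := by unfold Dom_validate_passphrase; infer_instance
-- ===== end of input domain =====

-- B recasts the task as a classification: each character is mapped to a class tag
-- ('U'/'L'/'D'/'S'/None), the SET of tags present is built, the bonus is the sum of a
-- weight table over that set, and the label is picked by indexing a label table with
-- the count of thresholds reached (alternative decomposition, same cost).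

-- ===== PORT A =====
def pvSpecialA (c : Char) : Bool := ("!@#$%^&*()_+-=[]{}|;:,.<>?".toList).contains c

def validate_passphrase (passphrase : String) : Int × String :=
  if passphrase.toList = [] then (0, "No passphrase")
  else
    let score : Int := min ((passphrase.toList.length : Int) * 5) 50
    let score := if passphrase.toList.any PySem.Chars.isupper then score + 10 else score
    let score := if passphrase.toList.any PySem.Chars.islower then score + 10 else score
    let score := if passphrase.toList.any PySem.Chars.isdigit then score + 10 else score
    let score := if passphrase.toList.any pvSpecialA then score + 20 else score
    if score ≥ 90 then (score, "Very Strong")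
    else if score ≥ 70 then (score, "Strong")
    else if score ≥ 50 then (score, "Medium")
    else if score ≥ 30 then (score, "Weak")
    else (score, "Very Weak")

-- ===== PORT B =====
def pvSpecialB (c : Char) : Bool := ("!@#$%^&*()_+-=[]{}|;:,.<>?".toList).contains c

-- Source B's classify: the class tag of a character, none when it is in no class
def pvClassify (c : Char) : Option Char :=
  if PySem.Chars.isupper c then some 'U'
  else if PySem.Chars.islower c then some 'L'
  else if PySem.Chars.isdigit c then some 'D'
  else if pvSpecialB c then some 'S'
  else none

def pvWeights : PySem.Dict Char Int := ⟨[('U', 10), ('L', 10), ('D', 10), ('S', 20)]⟩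

def pvLabels : List String := ["Very Weak", "Weak", "Medium", "Strong", "Very Strong"]

def validate_passphrase_alt (passphrase : String) : Int × String :=
  if passphrase.toList = [] then (0, "No passphrase")
  else
    -- classes = set(filter(None, map(classify, passphrase)))
    let classes : PySem.Set Char :=
      PySem.Set.ofList ((passphrase.toList.map pvClassify).filterMap id)
    -- sum(WEIGHTS[k] for k in classes): every k in classes is a key of WEIGHTS, so the
    -- getD default 0 is never used; a sum does not depend on the set's iteration order
    let score : Int :=
      min ((passphrase.toList.length : Int) * 5) 50
        + classes.foldl (fun a k => a + pvWeights.getD k 0) 0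
    -- idx = sum(score >= t for t in (30, 50, 70, 90)); labels[idx] is always in range
    let idx : Int := [(30 : Int), 50, 70, 90].foldl (fun a t => a + (if score ≥ t then 1 else 0)) 0
    (score, PySem.List.pyGetD pvLabels idx "")

-- ===== PRECONDITION & SPEC =====
def Spec_validate_passphrase (passphrase : String) (out : Int × String) : Prop := out = validate_passphrase_alt passphrase
instance (passphrase : String) (out : Int × String) : Decidable (Spec_validate_passphrase passphrase out) := by unfold Spec_validate_passphrase; infer_instance

-- ===== CLAIM (what is proved, stated in full; the proofs are below) =====
def Claim_equal_validate_passphrase : Prop := ∀ (passphrase : String), Dom_validate_passphrase passphrase → Spec_validate_passphrase passphrase (validate_passphrase passphrase)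

-- ===== LEMMAS AND PROOFS =====

-- the four class tests are mutually exclusive (disjoint ASCII ranges / punctuation)
theorem pv_upper_not_lower (c : Char) (h : PySem.Chars.isupper c = true) :
    PySem.Chars.islower c = false := by
  simp [PySem.Chars.isupper, Char.le_def, UInt32.le_iff_toNat_le] at h
  simp [PySem.Chars.islower, Char.le_def, UInt32.le_iff_toNat_le]
  omega

theorem pv_upper_not_digit (c : Char) (h : PySem.Chars.isupper c = true) :
    PySem.Chars.isdigit c = false := by
  simp [PySem.Chars.isupper, Char.le_def, UInt32.le_iff_toNat_le] at h
  simp [PySem.Chars.isdigit, Char.le_def, UInt32.le_iff_toNat_le]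
  omega

theorem pv_lower_not_digit (c : Char) (h : PySem.Chars.islower c = true) :
    PySem.Chars.isdigit c = false := by
  simp [PySem.Chars.islower, Char.le_def, UInt32.le_iff_toNat_le] at h
  simp [PySem.Chars.isdigit, Char.le_def, UInt32.le_iff_toNat_le]
  omega

theorem pv_special_plain (c : Char) (h : pvSpecialB c = true) :
    PySem.Chars.isupper c = false ∧ PySem.Chars.islower c = false ∧
      PySem.Chars.isdigit c = false := by
  simp [pvSpecialB] at h
  rcases h with h | h | h | h | h | h | h | h | h | h | h | h | h |
    h | h | h | h | h | h | h | h | h | h | h | h | h <;> subst h <;> decide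

theorem pv_upper_not_special (c : Char) (h : PySem.Chars.isupper c = true) :
    pvSpecialB c = false := by
  cases hs : pvSpecialB c with
  | false => rfl
  | true => rw [(pv_special_plain c hs).1] at h; exact absurd h (by simp)

theorem pv_lower_not_special (c : Char) (h : PySem.Chars.islower c = true) :
    pvSpecialB c = false := by
  cases hs : pvSpecialB c with
  | false => rfl
  | true => rw [(pv_special_plain c hs).2.1] at h; exact absurd h (by simp)

theorem pv_digit_not_special (c : Char) (h : PySem.Chars.isdigit c = true) :
    pvSpecialB c = false := by
  cases hs : pvSpecialB c with
  | false => rfl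
  | true => rw [(pv_special_plain c hs).2.2] at h; exact absurd h (by simp)

-- pvClassify characterised tag by tag
theorem pv_classify_U (c : Char) :
    pvClassify c = some 'U' ↔ PySem.Chars.isupper c = true := by
  unfold pvClassify; split_ifs <;> simp_all

theorem pv_classify_L (c : Char) :
    pvClassify c = some 'L' ↔ PySem.Chars.islower c = true := by
  unfold pvClassify
  split_ifs with h1 h2 h3 h4 <;> simp_all [pv_upper_not_lower]

theorem pv_classify_D (c : Char) :
    pvClassify c = some 'D' ↔ PySem.Chars.isdigit c = true := by
  unfold pvClassify
  split_ifs with h1 h2 h3 h4 <;>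
    simp_all [pv_upper_not_digit, pv_lower_not_digit]

theorem pv_classify_S (c : Char) :
    pvClassify c = some 'S' ↔ pvSpecialB c = true := by
  unfold pvClassify
  split_ifs with h1 h2 h3 h4 <;>
    simp_all [pv_upper_not_special, pv_lower_not_special, pv_digit_not_special]

-- membership of each tag in the classified list = the corresponding any() of A
theorem pv_mem_tag (l : List Char) (t : Char) (p : Char → Bool)
    (hch : ∀ c, pvClassify c = some t ↔ p c = true) :
    (t ∈ (l.map pvClassify).filterMap id) = (l.any p = true) := by
  simp only [List.filterMap_map, List.mem_filterMap, Function.comp_apply, id_eq,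
    List.any_eq_true, eq_iff_iff]
  constructor
  · rintro ⟨c, hc, h⟩; exact ⟨c, hc, (hch c).1 h⟩
  · rintro ⟨c, hc, h⟩; exact ⟨c, hc, (hch c).2 h⟩

-- every classified tag is one of the four
theorem pv_tag_cases (l : List Char) (t : Char) (ht : t ∈ (l.map pvClassify).filterMap id) :
    t = 'U' ∨ t = 'L' ∨ t = 'D' ∨ t = 'S' := by
  simp only [List.filterMap_map, List.mem_filterMap, Function.comp_apply, id_eq] at ht
  obtain ⟨c, -, h⟩ := ht
  unfold pvClassify at h
  split_ifs at h <;> simp_all <;> tauto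

-- pull the accumulator out of the weight-sum fold
theorem pv_foldl_add (w : Char → Int) (ts : List Char) (a : Int) :
    ts.foldl (fun x k => x + w k) a = a + ts.foldl (fun x k => x + w k) 0 := by
  induction ts generalizing a with
  | nil => simp
  | cons t r ih => simp only [List.foldl]; rw [ih (a + w t), ih (0 + w t)]; ring

-- the weight-sum over a duplicate-free list of tags, as four indicator terms
theorem pv_wsum (ts : List Char) (hnd : ts.Nodup)
    (hsub : ∀ t ∈ ts, t = 'U' ∨ t = 'L' ∨ t = 'D' ∨ t = 'S') :
    ts.foldl (fun a k => a + pvWeights.getD k 0) 0 =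
      (if 'U' ∈ ts then 10 else 0) + (if 'L' ∈ ts then 10 else 0)
        + (if 'D' ∈ ts then 10 else 0) + (if 'S' ∈ ts then 20 else 0) := by
  induction ts with
  | nil => simp
  | cons t r ih =>
    obtain ⟨htr, hndr⟩ := List.nodup_cons.mp hnd
    have ihr := ih hndr (fun x hx => hsub x (List.mem_cons_of_mem t hx))
    simp only [List.foldl]
    rw [pv_foldl_add, ihr]
    rcases hsub t List.mem_cons_self with h | h | h | h <;> subst h <;>
      simp [List.mem_cons, htr, pvWeights, PySem.Dict.getD, PySem.Dict.get?] <;>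
      split_ifs <;> simp_all

-- the threshold-count index into pvLabels equals A's if/elif ladder
theorem pv_label (s : Int) :
    PySem.List.pyGetD pvLabels
        ([(30 : Int), 50, 70, 90].foldl (fun a t => a + (if s ≥ t then 1 else 0)) 0) "" =
      if s ≥ 90 then "Very Strong"
      else if s ≥ 70 then "Strong"
      else if s ≥ 50 then "Medium"
      else if s ≥ 30 then "Weak"
      else "Very Weak" := by
  simp only [List.foldl]
  split_ifs <;> first | omega | decide


-- A's chained score updates equal B's four indicator terms added at once
theorem pv_score (b : Int) (u l d s : Bool) :
    (if s = true then
        (if d = true then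
            (if l = true then (if u = true then b + 10 else b) + 10
              else (if u = true then b + 10 else b)) + 10
          else
            (if l = true then (if u = true then b + 10 else b) + 10
              else (if u = true then b + 10 else b))) + 20
      else
        (if d = true then
            (if l = true then (if u = true then b + 10 else b) + 10
              else (if u = true then b + 10 else b)) + 10
          else
            (if l = true then (if u = true then b + 10 else b) + 10
              else (if u = true then b + 10 else b)))) =
      b + ((((if u = true then 10 else 0) + if l = true then 10 else 0)
            + if d = true then 10 else 0) + if s = true then 20 else 0) := by
  cases u <;> cases l <;> cases d <;> cases s <;> simp <;> ring

-- a pair of ladders with the same score commutes with the pairing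
theorem pv_pair (s : Int) :
    (if s ≥ 90 then (s, "Very Strong")
      else if s ≥ 70 then (s, "Strong")
      else if s ≥ 50 then (s, "Medium")
      else if s ≥ 30 then (s, "Weak")
      else (s, "Very Weak")) =
      (s, if s ≥ 90 then "Very Strong"
          else if s ≥ 70 then "Strong"
          else if s ≥ 50 then "Medium"
          else if s ≥ 30 then "Weak"
          else "Very Weak") := by
  split_ifs <;> rfl

-- ===== VERDICT (by name: the statement is the Claim_ definition above) =====
theorem validate_passphrase_spec : Claim_equal_validate_passphrase := by
  intro p _
  unfold Spec_validate_passphrase validate_passphrase validate_passphrase_alt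
  by_cases h : p.toList = []
  · simp [h]
  · simp only [h, if_false]
    set L := p.toList with hL
    set ts := (L.map pvClassify).filterMap id with hts
    have hnd : (PySem.Set.ofList ts).Nodup := PySem.Set.nodup_ofList ts
    have hsub : ∀ t ∈ PySem.Set.ofList ts, t = 'U' ∨ t = 'L' ∨ t = 'D' ∨ t = 'S' := by
      intro t htm
      exact pv_tag_cases L t ((PySem.Set.mem_ofList ts t).mp htm)
    rw [pv_wsum _ hnd hsub]
    have hU : ('U' ∈ PySem.Set.ofList ts) = (L.any PySem.Chars.isupper = true) := by
      rw [propext (PySem.Set.mem_ofList ts 'U'), hts,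
        pv_mem_tag L 'U' PySem.Chars.isupper pv_classify_U]
    have hLo : ('L' ∈ PySem.Set.ofList ts) = (L.any PySem.Chars.islower = true) := by
      rw [propext (PySem.Set.mem_ofList ts 'L'), hts,
        pv_mem_tag L 'L' PySem.Chars.islower pv_classify_L]
    have hD : ('D' ∈ PySem.Set.ofList ts) = (L.any PySem.Chars.isdigit = true) := by
      rw [propext (PySem.Set.mem_ofList ts 'D'), hts,
        pv_mem_tag L 'D' PySem.Chars.isdigit pv_classify_D]
    have hS : ('S' ∈ PySem.Set.ofList ts) = (L.any pvSpecialB = true) := by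
      rw [propext (PySem.Set.mem_ofList ts 'S'), hts,
        pv_mem_tag L 'S' pvSpecialB pv_classify_S]
    simp only [hU, hLo, hD, hS]
    have hspec : pvSpecialA = pvSpecialB := rfl
    rw [hspec, pv_score, pv_label, pv_pair]
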